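-- pv_equiv track=rewrite | github.com/RogerCrocker/BadaBib | src/customization.py | protect_caps
-- ===== SOURCE A (Python) =====
-- def protect_caps(string, bibstrings):
--     """
--     Protect upper case characters by putting them in brackets. Sequences of
--     upper case characters are put in a single pair of brackets.
--     """
--     # Check for empty inputs
--     if not string:
--         return None
--
--     protected = ""              # Text processes so far
--     upper_case_sequence = ""    # Sequence of upper case chars
--     pre_char = ""               # Character preceeding current one
--
--     for char in string:
--         # If char is upper case, add it to sequence
--         if char.isupper():
--             upper_case_sequence += char
--
--         # If char is lower case
--         else:
--             # Check if a sequence just ended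
--             if upper_case_sequence:
--                 # Check if sequence is a macro or protected already. Do not alter
--                 # sequence in this case.
--                 if (
--                     upper_case_sequence.lower() in bibstrings
--                     or (pre_char == "{" and char == "}")
--                 ):
--                     protected += upper_case_sequence
--                 # Otherwise, put it in brackets
--                 else:
--                     protected += "{" + upper_case_sequence + "}"
--
--                 # And start new, empty sequence
--                 upper_case_sequence = ""
--
--             # Char is lower case, does not need to be protected.
--             protected += char
--
--             # Remeber preceeding char
--             pre_char = char
--
--     # Catch string ending in a sequence of upper case chars
--     if upper_case_sequence:
--         if upper_case_sequence.lower() in bibstrings: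
--             protected += upper_case_sequence
--         else:
--             protected += "{" + upper_case_sequence + "}"
--         upper_case_sequence = ""
--
--     return protected
-- ===== SOURCE B (Python) =====
-- def protect_caps(string, bibstrings):
--     """Run-splitting reformulation: split the string into maximal runs of
--     same-case-ness, then decide each uppercase run from its neighbours."""
--     if not string:
--         return None
--     # split into maximal runs of characters with equal isupper()
--     runs = []
--     i, n = 0, len(string)
--     while i < n:
--         up = string[i].isupper()
--         j = i
--         while j < n and string[j].isupper() == up:
--             j += 1
--         runs.append((string[i:j], up))
--         i = j
--     parts = []
--     for idx, (run, up) in enumerate(runs):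
--         if up:
--             prev_char = runs[idx - 1][0][-1] if idx > 0 else ""
--             next_char = runs[idx + 1][0][0] if idx + 1 < len(runs) else ""
--             if run.lower() in bibstrings or (prev_char == "{" and next_char == "}"):
--                 parts.append(run)
--             else:
--                 parts.append("{" + run + "}")
--         else:
--             parts.append(run)
--     return "".join(parts)
-- ===== Notes on version B (the rewrite author's own statement) =====
-- stated objective: alternative
-- what changed: Replaces A's single character-by-character state machine (accumulating an open uppercase sequence, previous char and output string) by a two-phase algorithm: first split the string into maximal runs of equal isupper()-ness, then map each run to output looking only at its neighbouring runs.
import Mathlib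
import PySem

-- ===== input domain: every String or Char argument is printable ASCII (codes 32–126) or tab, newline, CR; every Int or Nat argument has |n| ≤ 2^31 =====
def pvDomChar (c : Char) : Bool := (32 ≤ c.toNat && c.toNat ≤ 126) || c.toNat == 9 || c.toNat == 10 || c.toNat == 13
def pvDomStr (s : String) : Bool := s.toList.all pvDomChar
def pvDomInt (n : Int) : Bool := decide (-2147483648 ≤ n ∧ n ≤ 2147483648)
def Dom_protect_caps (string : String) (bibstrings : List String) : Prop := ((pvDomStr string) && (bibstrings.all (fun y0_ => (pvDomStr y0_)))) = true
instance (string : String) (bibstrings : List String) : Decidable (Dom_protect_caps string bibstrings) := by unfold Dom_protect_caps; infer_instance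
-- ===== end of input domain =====

-- B replaces A's character-by-character state machine by a two-phase run-splitting
-- algorithm (split into maximal same-case runs, then decide each uppercase run from
-- its neighbouring runs); same cost, genuinely different structure (objective: alternative).


-- ===== PORT A =====
-- A's loop, char by char: state = (protected, upper_case_sequence, pre_char);
-- pre_char = "" is represented as `none`. The trailing flush is the `[]` case.
def aLoop (bib : List String) : List Char → List Char → List Char → Option Char → List Char
  | [], prot, seq, _ =>
      if seq ≠ [] then
        if String.mk (PySem.Chars.lower seq) ∈ bib then prot ++ seq
        else prot ++ '{' :: seq ++ ['}']
      else prot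
  | c :: rest, prot, seq, pre =>
      if PySem.Chars.isupper c then aLoop bib rest prot (seq ++ [c]) pre
      else
        let prot' :=
          if seq ≠ [] then
            if String.mk (PySem.Chars.lower seq) ∈ bib ∨ (pre = some '{' ∧ c = '}') then
              prot ++ seq
            else prot ++ '{' :: seq ++ ['}']
          else prot
        aLoop bib rest (prot' ++ [c]) [] (some c)

def protect_caps (string : String) (bibstrings : List String) : Option String :=
  if string = "" then none
  else some (String.mk (aLoop bibstrings string.toList [] [] none))

-- ===== PORT B =====
-- Source B phase 1: split into maximal runs of equal isupper()-ness.
def splitRuns : List Char → List (List Char × Bool)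
  | [] => []
  | c :: rest =>
      let u := PySem.Chars.isupper c
      ((c :: rest.takeWhile (fun d => PySem.Chars.isupper d == u)), u) ::
        splitRuns (rest.dropWhile (fun d => PySem.Chars.isupper d == u))
  termination_by cs => cs.length
  decreasing_by
    simp only [List.length_cons]
    exact Nat.lt_succ_of_le (List.length_dropWhile_le _ _)

-- Source B phase 2: emit each run; for an uppercase run, prev_char is the last char of
-- the previous run (none at the start) and next_char the first char of the next run.
def emitRuns (bib : List String) (prevLast : Option Char) : List (List Char × Bool) → List Char
  | [] => []
  | (run, up) :: rest =>
      let nextChar : Option Char := match rest with | [] => none | (r, _) :: _ => r.head?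
      (if up then
        if String.mk (PySem.Chars.lower run) ∈ bib ∨ (prevLast = some '{' ∧ nextChar = some '}') then
          run
        else '{' :: run ++ ['}']
      else run) ++ emitRuns bib run.getLast? rest

def protect_caps_alt (string : String) (bibstrings : List String) : Option String :=
  if string = "" then none
  else some (String.mk (emitRuns bibstrings none (splitRuns string.toList)))

-- ===== PRECONDITION & SPEC =====
def Spec_protect_caps (string : String) (bibstrings : List String) (out : Option String) : Prop := out = protect_caps_alt string bibstrings
instance (string : String) (bibstrings : List String) (out : Option String) : Decidable (Spec_protect_caps string bibstrings out) := by unfold Spec_protect_caps; infer_instance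

-- ===== CLAIM (what is proved, stated in full; the proofs are below) =====
def Claim_equal_protect_caps : Prop := ∀ (string : String) (bibstrings : List String), Dom_protect_caps string bibstrings → Spec_protect_caps string bibstrings (protect_caps string bibstrings)

-- ===== LEMMAS AND PROOFS =====

-- A's loop over a block of uppercase chars only accumulates the sequence.
theorem aLoop_upper_chunk (bib : List String) (r : List Char)
    (h : ∀ c ∈ r, PySem.Chars.isupper c = true) :
    ∀ cs prot seq pre, aLoop bib (r ++ cs) prot seq pre = aLoop bib cs prot (seq ++ r) pre := by
  induction r with
  | nil => intro cs prot seq pre; simp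
  | cons c r ih =>
      intro cs prot seq pre
      have hc : PySem.Chars.isupper c = true := h c (by simp)
      simp only [List.cons_append, aLoop, hc, if_pos]
      rw [ih (fun d hd => h d (by simp [hd]))]
      simp

-- A's loop over a block of non-upper chars (with empty sequence) just copies them,
-- remembering the last one as pre_char.
theorem aLoop_lower_chunk (bib : List String) (r : List Char) (hne : r ≠ [])
    (h : ∀ c ∈ r, PySem.Chars.isupper c = false) :
    ∀ cs prot pre, aLoop bib (r ++ cs) prot [] pre = aLoop bib cs (prot ++ r) [] r.getLast? := by
  induction r with
  | nil => exact absurd rfl hne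
  | cons c r ih =>
      intro cs prot pre
      have hc : PySem.Chars.isupper c = false := h c (by simp)
      simp only [List.cons_append, aLoop, hc]
      cases r with
      | nil => simp
      | cons d r' =>
          rw [ih (by simp) (fun e he => h e (by simp [he]))]
          simp [List.getLast?_cons_cons]

-- head of dropWhile fails the predicate
theorem dropWhile_head_false {α : Type} (p : α → Bool) :
    ∀ (l : List α) (d : α) (t : List α), l.dropWhile p = d :: t → p d = false := by
  intro l
  induction l with
  | nil => intro d t h; simp [List.dropWhile] at h
  | cons a l ih =>
      intro d t h
      by_cases ha : p a = true
      · rw [List.dropWhile_cons_of_pos ha] at h; exact ih d t h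
      · rw [List.dropWhile_cons_of_neg ha] at h
        cases h; simpa using ha

-- Main invariant: A's loop from a run boundary equals prefix ++ B's emitRuns.
theorem aLoop_eq_emit (bib : List String) :
    ∀ (cs : List Char) (prot : List Char) (pre : Option Char),
      aLoop bib cs prot [] pre = prot ++ emitRuns bib pre (splitRuns cs) := by
  intro cs
  induction cs using splitRuns.induct with
  | case1 => intro prot pre; simp [aLoop, splitRuns, emitRuns]
  | case2 c rest u ih =>
      intro prot pre
      have hsplit : c :: rest
          = (c :: rest.takeWhile (fun d => PySem.Chars.isupper d == PySem.Chars.isupper c))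
            ++ rest.dropWhile (fun d => PySem.Chars.isupper d == PySem.Chars.isupper c) := by
        rw [List.cons_append, List.takeWhile_append_dropWhile]
      by_cases hu : PySem.Chars.isupper c = true
      · -- uppercase run
        have hall : ∀ e ∈ c :: rest.takeWhile (fun d => PySem.Chars.isupper d == PySem.Chars.isupper c),
            PySem.Chars.isupper e = true := by
          intro e he
          rcases List.mem_cons.mp he with h | h
          · subst h; exact hu
          · have := List.mem_takeWhile_imp h
            simpa [hu] using this
        conv_lhs => rw [hsplit]
        rw [aLoop_upper_chunk bib _ hall, List.nil_append, splitRuns]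
        cases hrest' : rest.dropWhile (fun d => PySem.Chars.isupper d == PySem.Chars.isupper c) with
        | nil =>
            simp only [splitRuns]
            simp only [aLoop, emitRuns, hu]
            by_cases hm : String.mk (PySem.Chars.lower
                (c :: rest.takeWhile (fun d => PySem.Chars.isupper d))) ∈ bib
            · simp [hm]
            · simp [hm]
        | cons d rest2 =>
            have hd : PySem.Chars.isupper d = false := by
              have := dropWhile_head_false _ rest d rest2 hrest'
              simpa [hu] using this
            have ih' : ∀ (P : List Char) (X : Option Char),
                aLoop bib rest2 (P ++ [d]) [] (some d) = P ++ emitRuns bib X (splitRuns (d :: rest2)) := by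
              intro P X
              have ihc := ih P X
              rw [show List.dropWhile (fun d => PySem.Chars.isupper d == u) rest = d :: rest2 from hrest'] at ihc
              rw [← ihc]
              simp [aLoop, hd]
            simp only [aLoop, hd, Bool.false_eq_true, if_false, reduceCtorEq, ne_eq,
              not_false_iff, if_pos]
            rw [ih' _ ((c :: rest.takeWhile (fun d => PySem.Chars.isupper d == PySem.Chars.isupper c)).getLast?)]
            rw [splitRuns]
            simp only [emitRuns, hu, if_true, List.head?_cons, Option.some.injEq]
            split_ifs with h1 h2 <;> simp_all [List.append_assoc]
      · -- non-upper run
        have hu' : PySem.Chars.isupper c = false := by simpa using hu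
        have hall : ∀ e ∈ c :: rest.takeWhile (fun d => PySem.Chars.isupper d == PySem.Chars.isupper c),
            PySem.Chars.isupper e = false := by
          intro e he
          rcases List.mem_cons.mp he with h | h
          · subst h; exact hu'
          · have := List.mem_takeWhile_imp h
            simpa [hu'] using this
        conv_lhs => rw [hsplit]
        rw [aLoop_lower_chunk bib _ (by simp) hall, splitRuns, ih]
        have hufold : (fun d => PySem.Chars.isupper d == u) = (fun d => PySem.Chars.isupper d == false) := by
          funext e
          show (PySem.Chars.isupper e == PySem.Chars.isupper c) = _
          rw [hu']
        rw [hufold]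
        simp [emitRuns, hu', List.append_assoc]

theorem protect_caps_spec : Claim_equal_protect_caps := by
  intro s bib _
  unfold Spec_protect_caps protect_caps protect_caps_alt
  by_cases h : s = ""
  · simp [h]
  · simp only [h, if_false]
    rw [aLoop_eq_emit]
    simp
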